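-- pv_equiv track=rewrite | github.com/Artisa111/databot-analytics | app.py | _normalize_table_name
-- ===== SOURCE A (Python) =====
-- def _normalize_table_name(raw: str, fallback_idx: int = 1) -> str:
--     name = raw.rsplit(".csv", 1)[0]
--     name = "".join(ch.lower() if ch.isalnum() else "_" for ch in name)
--     name = "_".join(filter(None, name.split("_")))
--     if not name:
--         name = f"table_{fallback_idx}"
--     if name and name[0].isdigit():
--         name = f"t_{name}"
--     return name
-- ===== SOURCE B (Python) =====
-- def _normalize_table_name(raw: str, fallback_idx: int = 1) -> str:
--     name = raw.rsplit(".csv", 1)[0]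
--     buf = []
--     pending = False
--     for ch in name:
--         if ch.isalnum():
--             if pending and buf:
--                 buf.append("_")
--             buf.append(ch.lower())
--             pending = False
--         else:
--             pending = True
--     name = "".join(buf)
--     if not name:
--         name = f"table_{fallback_idx}"
--     if name[0].isdigit():
--         name = f"t_{name}"
--     return name
-- ===== Notes on version B (the rewrite author's own statement) =====
-- stated objective: alternative
-- what changed: Replaces the three-pass chain (map every char to alnum-or-underscore, split on underscore, filter empties, rejoin) by one left-to-right pass with a pending-separator flag that emits a single underscore only between runs of alphanumerics.
import Mathlib
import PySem

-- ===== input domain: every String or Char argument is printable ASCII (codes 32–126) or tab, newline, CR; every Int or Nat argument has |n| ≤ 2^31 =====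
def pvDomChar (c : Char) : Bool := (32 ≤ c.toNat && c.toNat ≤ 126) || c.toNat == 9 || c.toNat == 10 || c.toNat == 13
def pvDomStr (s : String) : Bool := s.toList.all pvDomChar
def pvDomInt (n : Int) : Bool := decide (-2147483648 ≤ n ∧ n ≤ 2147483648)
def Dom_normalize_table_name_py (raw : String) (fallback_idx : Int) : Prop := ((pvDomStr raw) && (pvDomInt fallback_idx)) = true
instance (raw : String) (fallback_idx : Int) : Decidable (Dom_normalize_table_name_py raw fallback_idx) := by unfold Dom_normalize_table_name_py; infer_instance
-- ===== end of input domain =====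

-- B is a single left-to-right pass with a pending-separator flag instead of A's
-- map / split('_') / filter / join chain; same return value, no speed claim.

-- ===== PORT A =====
-- hand port (exact): raw.rsplit(".csv", 1)[0] = prefix before the LAST occurrence
-- of ".csv" (the whole string when absent); `some r` = prefix before last occurrence.
def pvRsplitCsvHead : List Char → Option (List Char)
  | [] => none
  | c :: t =>
      match pvRsplitCsvHead t with
      | some r => some (c :: r)
      | none => if (".csv".toList).isPrefixOf (c :: t) then some [] else none

def normalize_table_name_py (raw : String) (fallback_idx : Int) : String :=
  let name0 := (pvRsplitCsvHead raw.toList).getD raw.toList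
  let name1 := name0.map (fun ch =>
      if PySem.Chars.isalnum ch then PySem.Chars.lowerChar ch else '_')
  let name2 := PySem.Chars.join ['_']
      ((PySem.Chars.splitOn name1 ['_']).filter (fun t => !t.isEmpty))
  let name3 := if name2 = [] then "table_".toList ++ (PySem.Int.toStr fallback_idx).toList else name2
  let name4 :=
    match name3 with
    | [] => name3            -- `if name and ...`: empty name skips the guard
    | c :: _ => if PySem.Chars.isdigit c then 't' :: '_' :: name3 else name3
  String.ofList name4

-- ===== PORT B =====
def pvBStep (st : List Char × Bool) (ch : Char) : List Char × Bool :=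
  if PySem.Chars.isalnum ch then
    ((st.1 ++ (if st.2 ∧ st.1 ≠ [] then ['_'] else [])) ++ [PySem.Chars.lowerChar ch], false)
  else
    (st.1, true)

def normalize_table_name_py_alt (raw : String) (fallback_idx : Int) : String :=
  let name0 := (pvRsplitCsvHead raw.toList).getD raw.toList
  let buf := (name0.foldl pvBStep ([], false)).1
  let name := if buf = [] then "table_".toList ++ (PySem.Int.toStr fallback_idx).toList else buf
  let name' :=
    match name with
    | [] => name             -- unreachable totalization guard for name[0]
    | c :: _ => if PySem.Chars.isdigit c then 't' :: '_' :: name else name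
  String.ofList name'

-- ===== PRECONDITION & SPEC =====
def Spec_normalize_table_name_py (raw : String) (fallback_idx : Int) (out : String) : Prop := out = normalize_table_name_py_alt raw fallback_idx
instance (raw : String) (fallback_idx : Int) (out : String) : Decidable (Spec_normalize_table_name_py raw fallback_idx out) := by unfold Spec_normalize_table_name_py; infer_instance

-- ===== CLAIM (what is proved, stated in full; the proofs are below) =====
def Claim_equal_normalize_table_name_py : Prop := ∀ (raw : String) (fallback_idx : Int), Dom_normalize_table_name_py raw fallback_idx → Spec_normalize_table_name_py raw fallback_idx (normalize_table_name_py raw fallback_idx)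

-- ===== LEMMAS AND PROOFS =====

-- structural characterization of splitting on a single '_'
def pvSp : List Char → List (List Char)
  | [] => [[]]
  | c :: t =>
      if c = '_' then [] :: pvSp t
      else
        match pvSp t with
        | [] => [[c]]
        | h :: r => (c :: h) :: r

def pvMapHead (f : List Char → List Char) : List (List Char) → List (List Char)
  | [] => []
  | h :: r => f h :: r

theorem pvSp_ne_nil (m : List Char) : pvSp m ≠ [] := by
  cases m with
  | nil => simp [pvSp]
  | cons c t =>
      simp only [pvSp]
      split
      · simp
      · split <;> simp

theorem pvGo_spec (m : List Char) : ∀ (fuel : Nat) (cur : List Char) (acc : List (List Char)),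
    m.length < fuel →
    PySem.Chars.splitOn.go ['_'] fuel m cur acc
      = acc.reverse ++ pvMapHead (fun x => cur.reverse ++ x) (pvSp m) := by
  induction m with
  | nil =>
      intro fuel cur acc h
      match fuel, h with
      | fuel + 1, _ => simp [PySem.Chars.splitOn.go, pvSp, pvMapHead]
  | cons c t ih =>
      intro fuel cur acc h
      match fuel, h with
      | fuel + 1, h =>
        by_cases hc : c = '_'
        · subst hc
          have hpre : (['_'] : List Char).isPrefixOf ('_' :: t) = true := by
            simp [List.isPrefixOf]
          rw [PySem.Chars.splitOn.go]
          simp only [hpre, if_pos]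
          have : List.drop (['_'] : List Char).length ('_' :: t) = t := by simp
          rw [this, ih fuel [] (cur.reverse :: acc) (by simpa using Nat.lt_of_succ_lt_succ h)]
          have hsp : pvSp ('_' :: t) = [] :: pvSp t := by simp [pvSp]
          rw [hsp]
          cases hspt : pvSp t with
          | nil => exact absurd hspt (pvSp_ne_nil t)
          | cons hh rr => simp [pvMapHead]
        · have hpre : (['_'] : List Char).isPrefixOf (c :: t) = false := by
            simp [List.isPrefixOf]
            intro hco
            exact hc hco.symm
          rw [PySem.Chars.splitOn.go]
          simp only [hpre]
          rw [if_neg (by simp)]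
          rw [ih fuel (c :: cur) acc (by simpa using Nat.lt_of_succ_lt_succ h)]
          have hsp : pvSp (c :: t) = pvMapHead (fun x => c :: x) (pvSp t) := by
            simp only [pvSp, if_neg hc]
            cases hspt : pvSp t with
            | nil => exact absurd hspt (pvSp_ne_nil t)
            | cons hh rr => simp [pvMapHead]
          rw [hsp]
          cases hspt : pvSp t with
          | nil => exact absurd hspt (pvSp_ne_nil t)
          | cons hh rr => simp [pvMapHead]

theorem pvSplitOn_eq (m : List Char) : PySem.Chars.splitOn m ['_'] = pvSp m := by
  have := pvGo_spec m (m.length + 1) [] [] (Nat.lt_succ_self _)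
  rw [PySem.Chars.splitOn] at *
  rw [this]
  cases hspt : pvSp m with
  | nil => exact absurd hspt (pvSp_ne_nil m)
  | cons hh rr => simp [pvMapHead]

-- the joined-filtered value A computes from the mapped list
def pvF (m : List Char) : List Char :=
  PySem.Chars.join ['_'] ((pvSp m).filter (fun t => !t.isEmpty))

def pvStartsAl : List Char → Bool
  | [] => false
  | c :: _ => c ≠ '_'

def pvPend (p : Bool) (m : List Char) : Bool :=
  match m.getLast? with
  | none => p
  | some c => c == '_'

theorem pvF_underscore (t : List Char) : pvF ('_' :: t) = pvF t := by
  simp [pvF, pvSp]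

theorem pvJoin_singleton (x : List Char) : PySem.Chars.join ['_'] [x] = x := by
  simp [PySem.Chars.join, List.intercalate, List.intersperse]

theorem pvJoin_cons_cons (x y : List Char) (zs : List (List Char)) :
    PySem.Chars.join ['_'] (x :: y :: zs) = x ++ '_' :: PySem.Chars.join ['_'] (y :: zs) := by
  simp [PySem.Chars.join, List.intercalate, List.intersperse]

theorem pvF_cons (c : Char) (t : List Char) (hc : c ≠ '_') :
    pvF (c :: t)
      = c :: (pvSp t).headI
          ++ (if ((pvSp t).tail.filter (fun x => !x.isEmpty)) = [] then []
              else '_' :: PySem.Chars.join ['_'] ((pvSp t).tail.filter (fun x => !x.isEmpty))) := by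
  cases hspt : pvSp t with
  | nil => exact absurd hspt (pvSp_ne_nil t)
  | cons hh rr =>
      simp only [pvF, pvSp, if_neg hc, hspt, List.headI, List.tail]
      simp only [List.filter_cons, List.isEmpty_cons, Bool.not_false, if_pos]
      cases hf : rr.filter (fun x => !x.isEmpty) with
      | nil => rw [pvJoin_singleton]; simp
      | cons a b => rw [pvJoin_cons_cons]; simp

theorem pvF_of_headI (t : List Char) :
    pvF t = (if (pvSp t).headI = [] then [] else (pvSp t).headI)
        ++ (if ((pvSp t).tail.filter (fun x => !x.isEmpty)) = [] then []
            else (if (pvSp t).headI = [] then [] else ['_'])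
                ++ PySem.Chars.join ['_'] ((pvSp t).tail.filter (fun x => !x.isEmpty))) := by
  cases hspt : pvSp t with
  | nil => exact absurd hspt (pvSp_ne_nil t)
  | cons hh rr =>
      simp only [pvF, hspt, List.headI, List.tail, List.filter_cons]
      by_cases hh0 : hh = []
      · subst hh0
        simp only [List.isEmpty_nil, Bool.not_true, if_pos rfl, List.nil_append,
          Bool.false_eq_true, if_false]
        cases hf : rr.filter (fun x => !x.isEmpty) with
        | nil => simp [hf, PySem.Chars.join, List.intercalate]
        | cons a b => simp [hf]
      · have hne : (!hh.isEmpty) = true := by simp [hh0]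
        simp only [hne, if_true, if_neg hh0]
        cases hf : rr.filter (fun x => !x.isEmpty) with
        | nil => rw [pvJoin_singleton]; simp
        | cons a b => rw [pvJoin_cons_cons]; simp

theorem pvStartsAl_of_sp_head (t : List Char) (h : (pvSp t).headI ≠ []) : pvStartsAl t = true := by
  cases t with
  | nil => simp [pvSp, List.headI] at h
  | cons c r =>
      simp only [pvSp] at h
      by_cases hc : c = '_'
      · simp [if_pos hc, List.headI] at h
      · simp [pvStartsAl, hc]

-- mapped-step: B's step on the original char equals the '_'-test step on the mapped char
def pvStepM (st : List Char × Bool) (c : Char) : List Char × Bool :=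
  if c ≠ '_' then
    ((st.1 ++ (if st.2 ∧ st.1 ≠ [] then ['_'] else [])) ++ [c], false)
  else
    (st.1, true)

def pvMapChar (ch : Char) : Char :=
  if PySem.Chars.isalnum ch then PySem.Chars.lowerChar ch else '_'

theorem pvCharLe (a b : Char) : (a ≤ b) ↔ a.toNat ≤ b.toNat := by
  rw [Char.le_def]; exact UInt32.le_iff_toNat_le

theorem pvLower_ne_underscore (c : Char) (h : PySem.Chars.isalnum c = true) :
    PySem.Chars.lowerChar c ≠ '_' := by
  have hA : ('A' : Char).toNat = 65 := by decide
  have hZ : ('Z' : Char).toNat = 90 := by decide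
  have ha : ('a' : Char).toNat = 97 := by decide
  have hz : ('z' : Char).toNat = 122 := by decide
  have h0 : ('0' : Char).toNat = 48 := by decide
  have h9 : ('9' : Char).toNat = 57 := by decide
  have hu : ('_' : Char).toNat = 95 := by decide
  simp only [PySem.Chars.isalnum, PySem.Chars.isalpha, PySem.Chars.isdigit,
    PySem.Chars.isupper, PySem.Chars.islower, Bool.or_eq_true, Bool.and_eq_true,
    decide_eq_true_eq, pvCharLe, hA, hZ, ha, hz, h0, h9] at h
  intro hcontra
  have htn : (PySem.Chars.lowerChar c).toNat = ('_' : Char).toNat := by rw [hcontra]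
  rw [hu] at htn
  by_cases hup : PySem.Chars.isupper c = true
  · have h65 : 65 ≤ c.toNat ∧ c.toNat ≤ 90 := by
      simpa only [PySem.Chars.isupper, Bool.and_eq_true, decide_eq_true_eq,
        pvCharLe, hA, hZ] using hup
    have hlc : (PySem.Chars.lowerChar c).toNat = c.toNat + 32 := by
      rw [PySem.Chars.lowerChar, if_pos hup, Char.toNat_ofNat, if_pos]
      exact Or.inl (by omega)
    omega
  · have hlc : PySem.Chars.lowerChar c = c := by
      rw [PySem.Chars.lowerChar, if_neg hup]
    rw [hlc] at htn
    omega

theorem pvBStep_eq (st : List Char × Bool) (c : Char) :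
    pvBStep st c = pvStepM st (pvMapChar c) := by
  by_cases h : PySem.Chars.isalnum c = true
  · simp [pvBStep, pvStepM, pvMapChar, h, pvLower_ne_underscore c h]
  · have h' : PySem.Chars.isalnum c = false := by simpa using h
    simp [pvBStep, pvStepM, pvMapChar, h']

theorem pvFoldB_map (s : List Char) (st : List Char × Bool) :
    s.foldl pvBStep st = (s.map pvMapChar).foldl pvStepM st := by
  rw [List.foldl_map]
  induction s generalizing st with
  | nil => rfl
  | cons c t ih => simp only [List.foldl_cons, pvBStep_eq, ih]

theorem pvJoin_filter_ne_nil (r : List (List Char))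
    (h : r.filter (fun x => !x.isEmpty) ≠ []) :
    PySem.Chars.join ['_'] (r.filter (fun x => !x.isEmpty)) ≠ [] := by
  cases hx : r.filter (fun x => !x.isEmpty) with
  | nil => exact absurd hx h
  | cons a b =>
      have ha : a ≠ [] := by
        have hmem : a ∈ r.filter (fun x => !x.isEmpty) := by
          rw [hx]; exact List.mem_cons_self
        have := List.of_mem_filter hmem
        simpa using this
      cases b with
      | nil => rw [pvJoin_singleton]; exact ha
      | cons a2 b2 =>
          rw [pvJoin_cons_cons]
          intro hcon
          cases a <;> simp_all

theorem pvSp_head_ne_of_startsAl (t : List Char) (h : pvStartsAl t = true) :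
    (pvSp t).headI ≠ [] := by
  cases t with
  | nil => simp [pvStartsAl] at h
  | cons a b =>
      have ha : a ≠ '_' := by simpa [pvStartsAl] using h
      simp only [pvSp, if_neg ha]
      cases hx : pvSp b with
      | nil => exact absurd hx (pvSp_ne_nil b)
      | cons hh rr => simp [List.headI]

theorem pvF_cons_alnum (c : Char) (t : List Char) (hc : c ≠ '_') :
    pvF (c :: t) = c :: ((if pvF t ≠ [] ∧ pvStartsAl t = false then ['_'] else []) ++ pvF t) := by
  rw [pvF_cons c t hc]
  by_cases hsh : (pvSp t).headI = []
  · have hFt : pvF t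
        = if ((pvSp t).tail.filter (fun x => !x.isEmpty)) = [] then []
          else PySem.Chars.join ['_'] ((pvSp t).tail.filter (fun x => !x.isEmpty)) := by
      rw [pvF_of_headI t]; simp [hsh]
    by_cases hfil : ((pvSp t).tail.filter (fun x => !x.isEmpty)) = []
    · have hFt0 : pvF t = [] := by rw [hFt]; simp [hfil]
      simp [hsh, hfil, hFt0]
    · have hFt' : pvF t = PySem.Chars.join ['_'] ((pvSp t).tail.filter (fun x => !x.isEmpty)) := by
        rw [hFt]; simp [hfil]
      have hne : pvF t ≠ [] := by rw [hFt']; exact pvJoin_filter_ne_nil _ hfil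
      have hstf : pvStartsAl t = false := by
        cases hq : pvStartsAl t with
        | false => rfl
        | true => exact absurd hsh (pvSp_head_ne_of_startsAl t hq)
      simp [hsh, hfil, hne, hstf, hFt', pvJoin_filter_ne_nil _ hfil]
  · have hst : pvStartsAl t = true := pvStartsAl_of_sp_head t hsh
    have hFt : pvF t
        = (pvSp t).headI ++ (if ((pvSp t).tail.filter (fun x => !x.isEmpty)) = [] then []
            else ['_'] ++ PySem.Chars.join ['_'] ((pvSp t).tail.filter (fun x => !x.isEmpty))) := by
      rw [pvF_of_headI t]; simp [hsh]
    simp [hst, hFt, hsh]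

-- the main loop invariant
theorem pvLoop_spec (m : List Char) : ∀ (acc : List Char) (p : Bool),
    m.foldl pvStepM (acc, p)
      = (acc ++ (if acc ≠ [] ∧ pvF m ≠ [] ∧ (p = true ∨ pvStartsAl m = false)
                 then ['_'] else []) ++ pvF m,
         pvPend p m) := by
  induction m with
  | nil =>
      intro acc p
      simp [pvF, pvSp, PySem.Chars.join, List.intercalate, List.intersperse, pvPend]
  | cons c t ih =>
      intro acc p
      by_cases hc : c = '_'
      · subst hc
        have hstep : pvStepM (acc, p) '_' = (acc, true) := by simp [pvStepM]
        rw [List.foldl_cons, hstep, ih acc true]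
        rw [pvF_underscore]
        have hpend : pvPend p ('_' :: t) = pvPend true t := by
          cases t with
          | nil => simp [pvPend]
          | cons a b =>
              simp only [pvPend, List.getLast?_cons_cons]
              cases hLast : (a :: b).getLast? with
              | none => simp at hLast
              | some x => rfl
        rw [hpend]
        have hstarts : pvStartsAl ('_' :: t) = false := by simp [pvStartsAl]
        simp only [hstarts]
        congr 1
        by_cases h1 : acc = [] <;> by_cases h2 : pvF t = [] <;>
          simp [h1, h2]
      · -- alnum (mapped ≠ '_') char
        have hstep : pvStepM (acc, p) c
            = ((acc ++ (if p ∧ acc ≠ [] then ['_'] else [])) ++ [c], false) := by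
          simp [pvStepM, hc]
        rw [List.foldl_cons, hstep, ih]
        have hFm : pvF (c :: t) ≠ [] := by
          rw [pvF_cons c t hc]; simp
        have hpend : pvPend p (c :: t) = pvPend false t := by
          cases t with
          | nil => simp [pvPend, hc]
          | cons a b =>
              simp only [pvPend, List.getLast?_cons_cons]
              cases hLast : (a :: b).getLast? with
              | none => simp at hLast
              | some x => rfl
        have hstarts : pvStartsAl (c :: t) = true := by simp [pvStartsAl, hc]
        rw [hpend]
        congr 1
        rw [pvF_cons_alnum c t hc]
        simp only [hstarts, hFm, ne_eq, Bool.true_eq_false, Bool.false_eq_true, false_or,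
          or_false, not_false_eq_true, true_and, and_true]
        by_cases hQ : pvF t ≠ [] ∧ pvStartsAl t = false <;>
          by_cases hp : p = true <;> by_cases hacc : acc = [] <;>
            simp [hQ, hp, hacc]

-- ===== VERDICT (by name: the statement is the Claim_ definition above) =====
theorem normalize_table_name_py_spec : Claim_equal_normalize_table_name_py := by
  intro raw fallback_idx _
  unfold Spec_normalize_table_name_py
  unfold normalize_table_name_py normalize_table_name_py_alt
  simp only
  congr 1
  rw [pvFoldB_map]
  rw [pvLoop_spec]
  rw [pvSplitOn_eq]
  simp only [pvF]
  rw [show pvMapChar = (fun ch => if PySem.Chars.isalnum ch = true then PySem.Chars.lowerChar ch else '_') from rfl]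
  rfl
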